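-- pv_equiv track=rewrite | github.com/nobe0716/problem_solving | codeforces/contests/1406/A. Subset Mex.py | solve
-- ===== SOURCE A (Python) =====
-- from collections import Counter
--
-- def solve(n, a):
--     c = Counter(a)
--     subseta = set()
--     subsetb = set()
--
--     for i in range(102):
--         if c[i] >= 2:
--             subseta.add(i)
--             subsetb.add(i)
--         elif c[i] == 1:
--             subseta.add(i)
--
--     mexa = mexb = 0
--     for i in range(102):
--         if i not in subseta:
--             mexa = i
--             break
--     for i in range(102):
--         if i not in subsetb:
--             mexb = i
--             break
--
--     return mexa + mexb
-- ===== SOURCE B (Python) =====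
-- def solve(n, a):
--     # Sort-and-sweep greedy: walk the values in sorted order with two
--     # "next needed value" counters; the first copy of the value subset A is
--     # waiting for advances A's mex, a further copy advances B's mex.
--     mex_a = mex_b = 0
--     for x in sorted(a):
--         if x == mex_a:
--             mex_a += 1
--         elif x == mex_b:
--             mex_b += 1
--     return mex_a + mex_b
-- ===== Notes on version B (the rewrite author's own statement) =====
-- stated objective: simpler
-- what changed: B replaces A's Counter + two sets + three scans over range(102) with a sort-and-sweep greedy: one pass over sorted(a) advances two 'next needed value' counters, the classic greedy for splitting into two subsets with maximal mex sum.
-- intended difference: On lists that contain every value 0..101 (impossible under the problem's n<=100 constraint), A's for-break loops never break and fall back to the stale default mexa=0 (and mexb=0 when every such value occurs twice), returning e.g. 0 instead of the true maximal mex sum; B returns the actual mex sum, which is the intended value. — e.g. on solve((102, [0,1,2,3,4,5,6,7,8,9,10,11,12,13,14,15,16,17,18,19,20,21,22,23,24,25,26,27,28,29,30,31, 32,33,34,35,36,37,38,39,4…): A returns 0, B returns 102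
import Mathlib
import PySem

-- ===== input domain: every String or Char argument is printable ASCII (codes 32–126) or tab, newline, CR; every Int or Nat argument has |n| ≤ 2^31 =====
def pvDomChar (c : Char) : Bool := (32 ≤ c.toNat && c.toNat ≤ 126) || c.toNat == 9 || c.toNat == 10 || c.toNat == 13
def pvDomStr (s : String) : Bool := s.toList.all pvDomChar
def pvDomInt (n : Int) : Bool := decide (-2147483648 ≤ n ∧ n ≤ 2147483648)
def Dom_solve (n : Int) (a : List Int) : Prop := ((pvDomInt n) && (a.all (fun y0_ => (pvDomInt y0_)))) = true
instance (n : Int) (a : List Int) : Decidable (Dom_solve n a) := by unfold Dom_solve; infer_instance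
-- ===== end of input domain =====

-- B replaces A's Counter + two sets + three range(102) scans by a sort-and-sweep greedy:
-- one pass over sorted(a) advancing two "next needed value" counters.

-- ===== PORT A =====
-- for i in range(102): if i not in s: mex = i; break   (default 0)
def pvFirstNotIn (s : PySem.Set Int) : List Int → Int
  | [] => 0
  | i :: t => if !(PySem.Set.contains s i) then i else pvFirstNotIn s t

def solve (n : Int) (a : List Int) : Int :=
  let c := PySem.Dict.counter a
  let sets := (PySem.List.pyRange 0 102 1).foldl
    (fun (p : PySem.Set Int × PySem.Set Int) i =>
      if 2 ≤ c.getD i 0 then (PySem.Set.add p.1 i, PySem.Set.add p.2 i)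
      else if c.getD i 0 = 1 then (PySem.Set.add p.1 i, p.2)
      else p)
    (PySem.Set.empty, PySem.Set.empty)
  let mexa := pvFirstNotIn sets.1 (PySem.List.pyRange 0 102 1)
  let mexb := pvFirstNotIn sets.2 (PySem.List.pyRange 0 102 1)
  mexa + mexb

-- ===== PORT B =====
-- the loop body: if x == mex_a: mex_a += 1 elif x == mex_b: mex_b += 1
def pvStep (p : Int × Int) (x : Int) : Int × Int :=
  if x = p.1 then (p.1 + 1, p.2) else if x = p.2 then (p.1, p.2 + 1) else p

def solve_alt (n : Int) (a : List Int) : Int :=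
  let p := (PySem.List.sorted a (fun x => x) false).foldl pvStep (0, 0)
  p.1 + p.2

-- ===== PRECONDITION & SPEC =====
-- On lists containing every value 0..101 (unreachable under the problem's n ≤ 100 constraint),
-- A's for-break loops never break and fall back to the stale default mexa = 0 (and mexb = 0 when
-- every such value occurs twice), e.g. returning 0; B returns the true maximal mex sum, which is
-- the intended value.
def D_solve (n : Int) (a : List Int) : Prop :=
  ∀ i ∈ PySem.List.pyRange 0 102 1, i ∈ a
instance (n : Int) (a : List Int) : Decidable (D_solve n a) := by unfold D_solve; infer_instance

def Spec_solve (n : Int) (a : List Int) (out : Int) : Prop := ¬ D_solve n a → out = solve_alt n a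
instance (n : Int) (a : List Int) (out : Int) : Decidable (Spec_solve n a out) := by unfold Spec_solve; infer_instance

def pvDiffWitness_solve : Int × List Int :=
  (102, [0,1,2,3,4,5,6,7,8,9,10,11,12,13,14,15,16,17,18,19,20,21,22,23,24,25,26,27,28,29,30,31,
   32,33,34,35,36,37,38,39,40,41,42,43,44,45,46,47,48,49,50,51,52,53,54,55,56,57,58,59,60,61,62,63,
   64,65,66,67,68,69,70,71,72,73,74,75,76,77,78,79,80,81,82,83,84,85,86,87,88,89,90,91,92,93,94,95,
   96,97,98,99,100,101])
def pvDiffWitnessOut_solve : Int × Int := (0, 102)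

-- ===== CLAIM (what is proved, stated in full; the proofs are below) =====
def Claim_unchanged_solve : Prop := ∀ (n : Int) (a : List Int), Dom_solve n a → Spec_solve n a (solve n a)
def Claim_changed_solve : Prop := Dom_solve (pvDiffWitness_solve.1) (pvDiffWitness_solve.2) ∧ D_solve (pvDiffWitness_solve.1) (pvDiffWitness_solve.2) ∧ solve (pvDiffWitness_solve.1) (pvDiffWitness_solve.2) = pvDiffWitnessOut_solve.1 ∧ solve_alt (pvDiffWitness_solve.1) (pvDiffWitness_solve.2) = pvDiffWitnessOut_solve.2 ∧ pvDiffWitnessOut_solve.1 ≠ pvDiffWitnessOut_solve.2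
def Claim_exact_solve : Prop := ∀ (n : Int) (a : List Int), Dom_solve n a → D_solve n a → solve n a ≠ solve_alt n a

-- ===== LEMMAS AND PROOFS =====

-- membership in A's two sets after the building fold
theorem pv_mem_fold (c : PySem.Dict Int Int) (l : List Int) (s t : PySem.Set Int) (x : Int) :
    (x ∈ (l.foldl
      (fun (p : PySem.Set Int × PySem.Set Int) i =>
        if 2 ≤ c.getD i 0 then (PySem.Set.add p.1 i, PySem.Set.add p.2 i)
        else if c.getD i 0 = 1 then (PySem.Set.add p.1 i, p.2)
        else p) (s, t)).1 ↔ x ∈ s ∨ (x ∈ l ∧ 1 ≤ c.getD x 0)) ∧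
    (x ∈ (l.foldl
      (fun (p : PySem.Set Int × PySem.Set Int) i =>
        if 2 ≤ c.getD i 0 then (PySem.Set.add p.1 i, PySem.Set.add p.2 i)
        else if c.getD i 0 = 1 then (PySem.Set.add p.1 i, p.2)
        else p) (s, t)).2 ↔ x ∈ t ∨ (x ∈ l ∧ 2 ≤ c.getD x 0)) := by
  induction l generalizing s t with
  | nil => simp
  | cons i l ih =>
    simp only [List.foldl_cons, List.mem_cons]
    by_cases h2 : 2 ≤ c.getD i 0
    · rw [if_pos h2]
      have := ih (PySem.Set.add s i) (PySem.Set.add t i)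
      constructor
      · rw [this.1, PySem.Set.mem_add]
        constructor
        · rintro ((hs | rfl) | ⟨hl, hc⟩)
          · exact Or.inl hs
          · exact Or.inr ⟨Or.inl rfl, by omega⟩
          · exact Or.inr ⟨Or.inr hl, hc⟩
        · rintro (hs | ⟨(rfl | hl), hc⟩)
          · exact Or.inl (Or.inl hs)
          · exact Or.inl (Or.inr rfl)
          · exact Or.inr ⟨hl, hc⟩
      · rw [this.2, PySem.Set.mem_add]
        constructor
        · rintro ((hs | rfl) | ⟨hl, hc⟩)
          · exact Or.inl hs
          · exact Or.inr ⟨Or.inl rfl, h2⟩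
          · exact Or.inr ⟨Or.inr hl, hc⟩
        · rintro (hs | ⟨(rfl | hl), hc⟩)
          · exact Or.inl (Or.inl hs)
          · exact Or.inl (Or.inr rfl)
          · exact Or.inr ⟨hl, hc⟩
    · rw [if_neg h2]
      by_cases h1 : c.getD i 0 = 1
      · rw [if_pos h1]
        have := ih (PySem.Set.add s i) t
        constructor
        · rw [this.1, PySem.Set.mem_add]
          constructor
          · rintro ((hs | rfl) | ⟨hl, hc⟩)
            · exact Or.inl hs
            · exact Or.inr ⟨Or.inl rfl, by omega⟩
            · exact Or.inr ⟨Or.inr hl, hc⟩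
          · rintro (hs | ⟨(rfl | hl), hc⟩)
            · exact Or.inl (Or.inl hs)
            · exact Or.inl (Or.inr rfl)
            · exact Or.inr ⟨hl, hc⟩
        · rw [this.2]
          constructor
          · rintro (hs | ⟨hl, hc⟩)
            · exact Or.inl hs
            · exact Or.inr ⟨Or.inr hl, hc⟩
          · rintro (hs | ⟨(rfl | hl), hc⟩)
            · exact Or.inl hs
            · omega
            · exact Or.inr ⟨hl, hc⟩
      · rw [if_neg h1]
        have := ih s t
        constructor
        · rw [this.1]
          constructor
          · rintro (hs | ⟨hl, hc⟩)
            · exact Or.inl hs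
            · exact Or.inr ⟨Or.inr hl, hc⟩
          · rintro (hs | ⟨(rfl | hl), hc⟩)
            · exact Or.inl hs
            · omega
            · exact Or.inr ⟨hl, hc⟩
        · rw [this.2]
          constructor
          · rintro (hs | ⟨hl, hc⟩)
            · exact Or.inl hs
            · exact Or.inr ⟨Or.inr hl, hc⟩
          · rintro (hs | ⟨(rfl | hl), hc⟩)
            · exact Or.inl hs
            · omega
            · exact Or.inr ⟨hl, hc⟩

-- A's for-break scan returns the least i ≥ lo (i < 102) outside s
theorem pv_firstNotIn_eq (s : PySem.Set Int) (m : Int) :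
    ∀ (k : Nat) (lo : Int), (102 - lo).toNat ≤ k → lo ≤ m → m < 102 → m ∉ s →
    (∀ i, lo ≤ i → i < m → i ∈ s) →
    pvFirstNotIn s (PySem.List.pyRange lo 102 1) = m := by
  intro k
  induction k with
  | zero =>
    intro lo hk hlo hm _ _
    omega
  | succ k ih =>
    intro lo hk hlo hm hnm hall
    have hlt : lo < 102 := by omega
    rw [PySem.List.pyRange_one_cons hlt]
    by_cases heq : lo = m
    · subst heq
      simp only [pvFirstNotIn]
      rw [if_pos]
      simp only [Bool.not_eq_true']
      rw [← Bool.not_eq_true, PySem.Set.contains_iff]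
      exact hnm
    · have hmem : lo ∈ s := hall lo le_rfl (by omega)
      simp only [pvFirstNotIn]
      rw [if_neg (by simp [PySem.Set.contains_iff]; exact hmem)]
      exact ih (lo + 1) (by omega) (by omega) hm hnm (fun i h1 h2 => hall i (by omega) h2)

-- if every element of l is in s the scan falls through to the default 0
theorem pv_firstNotIn_all (s : PySem.Set Int) (l : List Int) (h : ∀ i ∈ l, i ∈ s) :
    pvFirstNotIn s l = 0 := by
  induction l with
  | nil => rfl
  | cons i t ih =>
    simp only [pvFirstNotIn]
    rw [if_neg (by simp [PySem.Set.contains_iff]; exact h i List.mem_cons_self)]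
    exact ih (fun j hj => h j (List.mem_cons_of_mem _ hj))

theorem pv_firstNotIn_zero_or_mem (s : PySem.Set Int) (l : List Int) :
    pvFirstNotIn s l = 0 ∨ pvFirstNotIn s l ∈ l := by
  induction l with
  | nil => exact Or.inl rfl
  | cons i t ih =>
    simp only [pvFirstNotIn]
    split_ifs with h
    · exact Or.inr List.mem_cons_self
    · rcases ih with h0 | hm
      · exact Or.inl h0
      · exact Or.inr (List.mem_cons_of_mem _ hm)

-- greedy characterization: on a sorted list the two counters end at the least value of
-- count 0 (resp. the least value whose count is below its threshold)
theorem pv_greedy_eq (s : List Int) (hs : s.Pairwise (· ≤ ·)) :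
    ∀ (a0 b0 m0 m1 : Int), b0 ≤ a0 → a0 ≤ m0 → b0 ≤ m1 → m1 ≤ m0 →
    s.count m0 = 0 →
    (∀ v, a0 ≤ v → v < m0 → 1 ≤ s.count v) →
    (m1 < a0 → s.count m1 = 0) →
    (a0 ≤ m1 → s.count m1 ≤ 1) →
    (∀ v, b0 ≤ v → v < m1 → (v < a0 → 1 ≤ s.count v) ∧ (a0 ≤ v → 2 ≤ s.count v)) →
    s.foldl pvStep (a0, b0) = (m0, m1) := by
  induction s with
  | nil =>
    intro a0 b0 m0 m1 hba ham0 hbm1 hm10 _ hA _ _ hB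
    simp only [List.foldl_nil]
    have hm0 : m0 = a0 := by
      by_contra h
      have := hA a0 le_rfl (by omega)
      simp at this
    have hm1 : m1 = b0 := by
      by_contra h
      have hb := hB b0 le_rfl (by omega)
      by_cases hlt : b0 < a0
      · have := hb.1 hlt; simp at this
      · have := hb.2 (by omega); simp at this
    simp [hm0, hm1]
  | cons x t ih =>
    intro a0 b0 m0 m1 hba ham0 hbm1 hm10 hc0 hA hm1lt hm1ge hB
    have hxle : ∀ y ∈ t, x ≤ y := (List.pairwise_cons.mp hs).1
    have ht : t.Pairwise (· ≤ ·) := (List.pairwise_cons.mp hs).2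
    have hself : (x :: t).count x = t.count x + 1 := by simp [List.count_cons]
    have hne : ∀ v : Int, v ≠ x → (x :: t).count v = t.count v := by
      intro v h; simp [List.count_cons, h, Ne.symm h]
    simp only [List.foldl_cons, pvStep]
    by_cases hx1 : x = a0
    · rw [if_pos hx1]
      subst hx1
      -- x = a0: the first counter takes this copy
      have hxm0 : x < m0 := by
        rcases eq_or_lt_of_le ham0 with rfl | h
        · rw [hself] at hc0; omega
        · exact h
      apply ih ht (x + 1) b0 m0 m1 (by omega) (by omega) hbm1 hm10
      · have := hne m0 (by omega); omega
      · intro v h1 h2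
        have h3 := hA v (by omega) h2
        have := hne v (by omega); omega
      · intro h
        by_cases hlt : m1 < x
        · have h3 := hm1lt hlt
          have := hne m1 (by omega); omega
        · have hm1x : m1 = x := by omega
          have h3 := hm1ge (by omega)
          rw [hm1x, hself] at h3
          rw [hm1x]; omega
      · intro h
        have h3 := hm1ge (by omega)
        have := hne m1 (by omega); omega
      · intro v h1 h2
        have hv := hB v h1 h2
        constructor
        · intro hva
          by_cases hvx : v = x
          · subst hvx
            have := hv.2 le_rfl
            rw [hself] at this; omega
          · have := hv.1 (by omega)
            have := hne v (by omega); omega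
        · intro hva
          have := hv.2 (by omega)
          have := hne v (by omega); omega
    · rw [if_neg hx1]
      by_cases hx2 : x = b0
      · rw [if_pos hx2]
        subst hx2
        -- x = b0 < a0: the second counter takes this copy
        have hba' : x < a0 := lt_of_le_of_ne hba hx1
        have hxm1 : x < m1 := by
          rcases eq_or_lt_of_le hbm1 with rfl | h
          · have := hm1lt hba'
            rw [hself] at this; omega
          · exact h
        apply ih ht a0 (x + 1) m0 m1 (by omega) ham0 (by omega) hm10
        · have := hne m0 (by omega); omega
        · intro v h1 h2
          have h3 := hA v h1 h2
          have := hne v (by omega); omega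
        · intro h
          have h3 := hm1lt h
          have := hne m1 (by omega); omega
        · intro h
          have h3 := hm1ge h
          have := hne m1 (by omega); omega
        · intro v h1 h2
          have hv := hB v (by omega) h2
          have hnv := hne v (by omega)
          exact ⟨fun hh => by have := hv.1 hh; omega,
                 fun hh => by have := hv.2 hh; omega⟩
      · rw [if_neg hx2]
        -- x matches neither counter
        by_cases hxb : x < b0
        · -- a stale duplicate below both counters: relevant counts unchanged
          apply ih ht a0 b0 m0 m1 hba ham0 hbm1 hm10
          · have := hne m0 (by omega); omega
          · intro v h1 h2
            have h3 := hA v h1 h2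
            have := hne v (by omega); omega
          · intro h
            have h3 := hm1lt h
            have := hne m1 (by omega); omega
          · intro h
            have h3 := hm1ge h
            have := hne m1 (by omega); omega
          · intro v h1 h2
            have hv := hB v h1 h2
            have hnv := hne v (by omega)
            exact ⟨fun hh => by have := hv.1 hh; omega,
                   fun hh => by have := hv.2 hh; omega⟩
        · -- x > b0 (x ≠ b0): sortedness forces count b0 = 0, hence m1 = b0 already;
          -- when moreover x > a0, m0 = a0 too — both counters are stuck
          have hxb' : b0 < x := by omega
          have hcb0 : (x :: t).count b0 = 0 := by
            rw [List.count_eq_zero]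
            intro hmem
            rcases List.mem_cons.mp hmem with h | h
            · omega
            · have := hxle b0 h; omega
          have hm1b : m1 = b0 := by
            by_contra h
            have hv := hB b0 le_rfl (by omega)
            by_cases hlt : b0 < a0
            · have := hv.1 hlt; omega
            · have := hv.2 (by omega); omega
          subst hm1b
          have hctb0 : t.count m1 = 0 := by
            have := hne m1 (by omega); omega
          by_cases hxa : x < a0
          · apply ih ht a0 m1 m0 m1 hba ham0 le_rfl hm10
            · have := hne m0 (by omega); omega
            · intro v h1 h2
              have h3 := hA v h1 h2
              have := hne v (by omega); omega
            · intro h; exact hctb0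
            · intro h; omega
            · intro v h1 h2; omega
          · have hxa' : a0 < x := by omega
            have hca0 : (x :: t).count a0 = 0 := by
              rw [List.count_eq_zero]
              intro hmem
              rcases List.mem_cons.mp hmem with h | h
              · omega
              · have := hxle a0 h; omega
            have hm0a : m0 = a0 := by
              by_contra h
              have := hA a0 le_rfl (by omega)
              omega
            subst hm0a
            apply ih ht m0 m1 m0 m1 hba le_rfl le_rfl hm10
            · have := hne m0 (by omega); omega
            · intro v h1 h2; omega
            · intro h; exact hctb0
            · intro h; omega
            · intro v h1 h2; omega

-- the first counter ignores the second
theorem pv_fst_foldl (s : List Int) :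
    ∀ (p : Int × Int), (s.foldl pvStep p).1 = s.foldl (fun a x => if x = a then a + 1 else a) p.1 := by
  induction s with
  | nil => intro p; rfl
  | cons x t ih =>
    intro p
    simp only [List.foldl_cons, pvStep]
    by_cases h1 : x = p.1
    · rw [if_pos h1, if_pos h1]
      exact ih (p.1 + 1, p.2)
    · rw [if_neg h1, if_neg h1]
      by_cases h2 : x = p.2
      · rw [if_pos h2]
        exact ih (p.1, p.2 + 1)
      · rw [if_neg h2]
        exact ih p

-- the second counter never decreases
theorem pv_snd_foldl_ge (s : List Int) :
    ∀ (p : Int × Int), p.2 ≤ (s.foldl pvStep p).2 := by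
  induction s with
  | nil => intro p; exact le_rfl
  | cons x t ih =>
    intro p
    simp only [List.foldl_cons, pvStep]
    split_ifs with h1 h2
    · exact ih (p.1 + 1, p.2)
    · exact le_trans (by omega) (ih (p.1, p.2 + 1))
    · exact ih p

theorem pv_fstA_mono (s : List Int) :
    ∀ a0 : Int, a0 ≤ s.foldl (fun a x => if x = a then a + 1 else a) a0 := by
  induction s with
  | nil => intro a0; exact le_rfl
  | cons x t ih =>
    intro a0
    simp only [List.foldl_cons]
    split_ifs with h
    · exact le_trans (by omega) (ih (a0 + 1))
    · exact ih a0

-- if every value in [a0, m) occurs, the first counter climbs past m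
theorem pv_fstA_ge (s : List Int) (hs : s.Pairwise (· ≤ ·)) :
    ∀ (a0 m : Int), (∀ v, a0 ≤ v → v < m → 1 ≤ s.count v) →
    m ≤ s.foldl (fun a x => if x = a then a + 1 else a) a0 := by
  induction s with
  | nil =>
    intro a0 m hA
    simp only [List.foldl_nil]
    by_contra h
    have := hA a0 le_rfl (by omega)
    simp at this
  | cons x t ih =>
    intro a0 m hA
    have hxle : ∀ y ∈ t, x ≤ y := (List.pairwise_cons.mp hs).1
    have ht : t.Pairwise (· ≤ ·) := (List.pairwise_cons.mp hs).2
    by_cases hma : m ≤ a0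
    · exact le_trans hma (pv_fstA_mono (x :: t) a0)
    · push_neg at hma
      simp only [List.foldl_cons]
      split_ifs with h
      · subst h
        apply ih ht (x + 1) m
        intro v h1 h2
        have h3 := hA v (by omega) h2
        have hne : x ≠ v := by omega
        rw [List.count_cons] at h3
        simpa [hne] using h3
      · by_cases hxa : x < a0
        · apply ih ht a0 m
          intro v h1 h2
          have h3 := hA v h1 h2
          have hne : x ≠ v := by omega
          rw [List.count_cons] at h3
          simpa [hne] using h3
        · exfalso
          have hxa' : a0 < x := by omega
          have hmem : a0 ∈ x :: t := by
            have h' := hA a0 le_rfl (by omega)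
            exact List.count_pos_iff.mp (by omega)
          rcases List.mem_cons.mp hmem with hh | hh
          · omega
          · have := hxle a0 hh; omega

-- counts transfer between a and sorted(a)
theorem pv_count_sorted (a : List Int) (v : Int) :
    (PySem.List.sorted a (fun x => x) false).count v = a.count v :=
  (PySem.List.sorted_perm a (fun x => x) false).count_eq v

theorem pv_sorted_pairwise (a : List Int) :
    (PySem.List.sorted a (fun x => x) false).Pairwise (· ≤ ·) :=
  PySem.List.sorted_pairwise a (fun x => x)

-- ===== VERDICT (by name: the statement is the Claim_ definition above) =====
theorem solve_spec : Claim_unchanged_solve := by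
  intro n a _ hD
  show solve n a = solve_alt n a
  -- an absent value below 102 exists; take the least (as a Nat index)
  have hex : ∃ k : Nat, k < 102 ∧ (k : Int) ∉ a := by
    simp only [D_solve] at hD
    push_neg at hD
    obtain ⟨i, hi, hia⟩ := hD
    rw [PySem.List.mem_pyRange_one] at hi
    exact ⟨i.toNat, by omega, by rwa [Int.toNat_of_nonneg hi.1]⟩
  have hex1 : ∃ k : Nat, k < 102 ∧ a.count (k : Int) ≤ 1 := by
    obtain ⟨k, hk, hka⟩ := hex
    exact ⟨k, hk, by rw [List.count_eq_zero.mpr hka]; omega⟩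
  set k0 := Nat.find hex with hk0
  set k1 := Nat.find hex1 with hk1
  have hk0spec := Nat.find_spec hex
  have hk1spec := Nat.find_spec hex1
  have hk10 : k1 ≤ k0 := Nat.find_le ⟨hk0spec.1, by rw [List.count_eq_zero.mpr hk0spec.2]; omega⟩
  set m0 : Int := (k0 : Int) with hm0
  set m1 : Int := (k1 : Int) with hm1
  have hc0 : a.count m0 = 0 := List.count_eq_zero.mpr hk0spec.2
  have hc1 : a.count m1 ≤ 1 := hk1spec.2
  have hminA : ∀ v : Int, 0 ≤ v → v < m0 → 1 ≤ a.count v := by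
    intro v h1 h2
    have hv : v.toNat < k0 := by omega
    have := Nat.find_min hex hv
    push_neg at this
    have hmem := this (by omega)
    rw [Int.toNat_of_nonneg h1] at hmem
    exact List.count_pos_iff.mpr hmem
  have hminB : ∀ v : Int, 0 ≤ v → v < m1 → 2 ≤ a.count v := by
    intro v h1 h2
    have hv : v.toNat < k1 := by omega
    have := Nat.find_min hex1 hv
    push_neg at this
    have := this (by omega)
    rw [Int.toNat_of_nonneg h1] at this
    omega
  -- A's side: the two scans return m0 and m1
  have hAside : solve n a = m0 + m1 := by
    simp only [solve]
    have hfold := fun x => pv_mem_fold (PySem.Dict.counter a) (PySem.List.pyRange 0 102 1)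
      PySem.Set.empty PySem.Set.empty x
    have hmema : ∀ x : Int,
        (x ∈ ((PySem.List.pyRange 0 102 1).foldl
          (fun (p : PySem.Set Int × PySem.Set Int) i =>
            if 2 ≤ (PySem.Dict.counter a).getD i 0 then (PySem.Set.add p.1 i, PySem.Set.add p.2 i)
            else if (PySem.Dict.counter a).getD i 0 = 1 then (PySem.Set.add p.1 i, p.2)
            else p) (PySem.Set.empty, PySem.Set.empty)).1
          ↔ x ∈ PySem.List.pyRange 0 102 1 ∧ 1 ≤ a.count x) := by
      intro x
      rw [(hfold x).1, PySem.Dict.getD_counter]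
      simp only [PySem.Set.empty]
      constructor
      · rintro (h | ⟨h1, h2⟩)
        · simp at h
        · exact ⟨h1, by exact_mod_cast h2⟩
      · rintro ⟨h1, h2⟩
        exact Or.inr ⟨h1, by exact_mod_cast h2⟩
    have hmemb : ∀ x : Int,
        (x ∈ ((PySem.List.pyRange 0 102 1).foldl
          (fun (p : PySem.Set Int × PySem.Set Int) i =>
            if 2 ≤ (PySem.Dict.counter a).getD i 0 then (PySem.Set.add p.1 i, PySem.Set.add p.2 i)
            else if (PySem.Dict.counter a).getD i 0 = 1 then (PySem.Set.add p.1 i, p.2)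
            else p) (PySem.Set.empty, PySem.Set.empty)).2
          ↔ x ∈ PySem.List.pyRange 0 102 1 ∧ 2 ≤ a.count x) := by
      intro x
      rw [(hfold x).2, PySem.Dict.getD_counter]
      simp only [PySem.Set.empty]
      constructor
      · rintro (h | ⟨h1, h2⟩)
        · simp at h
        · exact ⟨h1, by exact_mod_cast h2⟩
      · rintro ⟨h1, h2⟩
        exact Or.inr ⟨h1, by exact_mod_cast h2⟩
    have ha := pv_firstNotIn_eq _ m0 102 0 (by norm_num) (by omega) (by omega)
      (by rw [hmema]; rintro ⟨_, h⟩; omega)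
      (by
        intro i h1 h2
        rw [hmema]
        exact ⟨PySem.List.mem_pyRange_one.mpr ⟨h1, by omega⟩, hminA i h1 h2⟩)
    have hb := pv_firstNotIn_eq _ m1 102 0 (by norm_num) (by omega) (by omega)
      (by rw [hmemb]; rintro ⟨_, h⟩; omega)
      (by
        intro i h1 h2
        rw [hmemb]
        exact ⟨PySem.List.mem_pyRange_one.mpr ⟨h1, by omega⟩, hminB i h1 h2⟩)
    rw [ha, hb]
  -- B's side: the greedy over sorted(a) ends at (m0, m1)
  have hBside : solve_alt n a = m0 + m1 := by
    simp only [solve_alt]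
    have hgr := pv_greedy_eq (PySem.List.sorted a (fun x => x) false) (pv_sorted_pairwise a)
      0 0 m0 m1 le_rfl (by omega) (by omega) (by omega)
      (by rw [pv_count_sorted]; exact hc0)
      (fun v h1 h2 => by rw [pv_count_sorted]; exact hminA v h1 h2)
      (by omega)
      (fun _ => by rw [pv_count_sorted]; exact hc1)
      (fun v h1 h2 => ⟨fun h => by omega, fun _ => by rw [pv_count_sorted]; exact hminB v h1 h2⟩)
    rw [hgr]
  rw [hAside, hBside]

set_option maxRecDepth 100000 in
theorem solve_changed : Claim_changed_solve := by
  unfold Claim_changed_solve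
  refine ⟨by decide, by decide, by decide, by decide, by decide⟩

theorem solve_tight : Claim_exact_solve := by
  intro n a _ hD
  simp only [D_solve] at hD
  have hall : ∀ i : Int, 0 ≤ i → i < 102 → i ∈ a := by
    intro i h1 h2
    exact hD i (PySem.List.mem_pyRange_one.mpr ⟨h1, h2⟩)
  -- A's value is at most 101: mexa falls through to 0, mexb is 0 or in range(102)
  have hAle : solve n a ≤ 101 ∧ 0 ≤ solve n a := by
    simp only [solve]
    have hfold := fun x => pv_mem_fold (PySem.Dict.counter a) (PySem.List.pyRange 0 102 1)
      PySem.Set.empty PySem.Set.empty x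
    have ha : pvFirstNotIn ((PySem.List.pyRange 0 102 1).foldl
        (fun (p : PySem.Set Int × PySem.Set Int) i =>
          if 2 ≤ (PySem.Dict.counter a).getD i 0 then (PySem.Set.add p.1 i, PySem.Set.add p.2 i)
          else if (PySem.Dict.counter a).getD i 0 = 1 then (PySem.Set.add p.1 i, p.2)
          else p) (PySem.Set.empty, PySem.Set.empty)).1 (PySem.List.pyRange 0 102 1) = 0 := by
      apply pv_firstNotIn_all
      intro i hi
      rw [(hfold i).1]
      refine Or.inr ⟨hi, ?_⟩
      rw [PySem.Dict.getD_counter]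
      have := PySem.List.mem_pyRange_one.mp hi
      have := List.count_pos_iff.mpr (hall i this.1 this.2)
      exact_mod_cast this
    rw [ha]
    rcases pv_firstNotIn_zero_or_mem ((PySem.List.pyRange 0 102 1).foldl
        (fun (p : PySem.Set Int × PySem.Set Int) i =>
          if 2 ≤ (PySem.Dict.counter a).getD i 0 then (PySem.Set.add p.1 i, PySem.Set.add p.2 i)
          else if (PySem.Dict.counter a).getD i 0 = 1 then (PySem.Set.add p.1 i, p.2)
          else p) (PySem.Set.empty, PySem.Set.empty)).2 (PySem.List.pyRange 0 102 1) with h0 | hm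
    · rw [h0]; omega
    · have := PySem.List.mem_pyRange_one.mp hm; omega
  -- B's value is at least 102
  have hBge : 102 ≤ solve_alt n a := by
    simp only [solve_alt]
    have h1 := pv_fst_foldl (PySem.List.sorted a (fun x => x) false) (0, 0)
    have h2 := pv_snd_foldl_ge (PySem.List.sorted a (fun x => x) false) (0, 0)
    have h3 := pv_fstA_ge (PySem.List.sorted a (fun x => x) false) (pv_sorted_pairwise a) 0 102
      (by
        intro v hv1 hv2
        rw [pv_count_sorted]
        exact List.count_pos_iff.mpr (hall v hv1 hv2))
    simp only at h1 h2
    omega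
  omega
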